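-- pv_equiv track=rewrite | github.com/wangwingzero/sign-in | platforms/manager.py | _looks_like_ldoh_site_item
-- ===== SOURCE A (Python) =====
-- def _looks_like_ldoh_site_item(item: dict) -> bool:
--     """判断单个字典是否像 LDOH 站点对象。"""
--     if not isinstance(item, dict):
--         return False
--     keys = {str(k).lower() for k in item.keys()}
--     strong_keys = {"apibaseurl", "supportscheckin", "checkinurl"}
--     if keys & strong_keys:
--         return True
--     has_name = "name" in keys or "title" in keys
--     has_urlish = any(("api" in k and "url" in k) for k in keys) or "domain" in keys
--     return has_name and has_urlish
-- ===== SOURCE B (Python) =====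
-- _LDOH_CATEGORIES = {
--     "apibaseurl": 0, "supportscheckin": 0, "checkinurl": 0,
--     "name": 1, "title": 1,
--     "domain": 2,
-- }
--
--
-- def _classify_ldoh_key(kl: str) -> int:
--     """策略表驱动的键分类: 0=强键, 1=名称键, 2=URL 相关键, 3=其他。"""
--     c = _LDOH_CATEGORIES.get(kl)
--     if c is not None:
--         return c
--     if "api" in kl and "url" in kl:
--         return 2
--     return 3
--
--
-- def _looks_like_ldoh_site_item(item: dict) -> bool:
--     """判断单个字典是否像 LDOH 站点对象。"""
--     if not isinstance(item, dict):
--         return False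
--     seen = set()
--     for k in item.keys():
--         c = _classify_ldoh_key(str(k).lower())
--         if c == 0:
--             return True
--         seen.add(c)
--     return 1 in seen and 2 in seen
-- ===== Notes on version B (the rewrite author's own statement) =====
-- stated objective: alternative
-- what changed: Replaces A's build-a-lowercased-key-set-then-three-set/any-queries shape with a table-driven key classifier (a category lookup dict with a substring fallback) and a short-circuiting scan that collects seen categories in a set, returning early on a strong key.
import Mathlib
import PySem

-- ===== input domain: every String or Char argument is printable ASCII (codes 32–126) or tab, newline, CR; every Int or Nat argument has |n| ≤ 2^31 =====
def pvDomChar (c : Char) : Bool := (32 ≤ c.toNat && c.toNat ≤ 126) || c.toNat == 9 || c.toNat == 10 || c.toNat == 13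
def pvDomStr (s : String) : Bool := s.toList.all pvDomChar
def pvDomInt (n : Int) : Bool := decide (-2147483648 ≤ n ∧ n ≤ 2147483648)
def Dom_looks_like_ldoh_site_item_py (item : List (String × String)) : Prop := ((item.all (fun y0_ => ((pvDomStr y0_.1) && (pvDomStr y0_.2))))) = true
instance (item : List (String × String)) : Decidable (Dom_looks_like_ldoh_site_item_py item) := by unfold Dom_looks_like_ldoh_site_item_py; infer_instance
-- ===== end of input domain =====

-- B replaces A's "build a lowercased key set, then three set/any queries" with a table-driven
-- key classifier (a lookup dict + substring fallback) and a short-circuiting scan that collects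
-- the seen categories in a set and returns early on a strong key (alternative decomposition; same cost).


-- ===== PORT A =====
-- strong_keys = {"apibaseurl", "supportscheckin", "checkinurl"}
def ldohStrongKeys : PySem.Set String :=
  PySem.Set.ofList ["apibaseurl", "supportscheckin", "checkinurl"]

-- the isinstance(item, dict) guard is always true under the type convention (item is a dict)
def looks_like_ldoh_site_item_py (item : List (String × String)) : Bool :=
  -- keys = {str(k).lower() for k in item.keys()}
  let keys : PySem.Set String :=
    PySem.Set.ofList (((PySem.Dict.ofList item).keys).map (fun k => PySem.Str.lower k))
  -- if keys & strong_keys: return True  (truthiness of a set = non-emptiness)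
  if !(PySem.Set.inter keys ldohStrongKeys).isEmpty then true
  else
    -- has_name = "name" in keys or "title" in keys
    let has_name := PySem.Set.contains keys "name" || PySem.Set.contains keys "title"
    -- has_urlish = any(("api" in k and "url" in k) for k in keys) or "domain" in keys
    let has_urlish :=
      (keys.any (fun k => PySem.Str.isIn "api" k && PySem.Str.isIn "url" k)) ||
        PySem.Set.contains keys "domain"
    has_name && has_urlish

-- ===== PORT B =====
-- _LDOH_CATEGORIES: the classification table (0 = strong, 1 = name-like, 2 = url-like)
def ldohCats : PySem.Dict String Int :=
  PySem.Dict.ofList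
    [("apibaseurl", 0), ("supportscheckin", 0), ("checkinurl", 0),
     ("name", 1), ("title", 1), ("domain", 2)]

-- _classify_ldoh_key: table lookup, substring fallback, 3 = other
def ldohClassify (kl : String) : Int :=
  match PySem.Dict.get? ldohCats kl with
  | some c => c
  | none => if PySem.Str.isIn "api" kl && PySem.Str.isIn "url" kl then 2 else 3

-- the for-loop with its early `return True` (category 0) and `seen.add(c)`
def ldohScan : List String → PySem.Set Int → Bool
  | [], seen => PySem.Set.contains seen 1 && PySem.Set.contains seen 2
  | k :: ks, seen =>
    let c := ldohClassify (PySem.Str.lower k)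
    if c == 0 then true else ldohScan ks (PySem.Set.add seen c)

def looks_like_ldoh_site_item_py_alt (item : List (String × String)) : Bool :=
  ldohScan ((PySem.Dict.ofList item).keys) PySem.Set.empty

-- ===== PRECONDITION & SPEC =====
def Spec_looks_like_ldoh_site_item_py (item : List (String × String)) (out : Bool) : Prop := out = looks_like_ldoh_site_item_py_alt item
instance (item : List (String × String)) (out : Bool) : Decidable (Spec_looks_like_ldoh_site_item_py item out) := by unfold Spec_looks_like_ldoh_site_item_py; infer_instance

-- ===== CLAIM (what is proved, stated in full; the proofs are below) =====
def Claim_equal_looks_like_ldoh_site_item_py : Prop := ∀ (item : List (String × String)), Dom_looks_like_ldoh_site_item_py item → Spec_looks_like_ldoh_site_item_py item (looks_like_ldoh_site_item_py item)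

-- ===== LEMMAS AND PROOFS =====

-- abbreviations for the three per-key predicates of A (on the lowercased key)
def ldohG1 (kl : String) : Bool := kl == "apibaseurl" || kl == "supportscheckin" || kl == "checkinurl"
def ldohG2 (kl : String) : Bool := kl == "name" || kl == "title"
def ldohG3 (kl : String) : Bool := (PySem.Str.isIn "api" kl && PySem.Str.isIn "url" kl) || kl == "domain"

theorem ldoh_mem_strong (x : String) :
    x ∈ ldohStrongKeys ↔ x = "apibaseurl" ∨ x = "supportscheckin" ∨ x = "checkinurl" := by
  simp [ldohStrongKeys, PySem.Set.mem_ofList]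

-- Python truthiness of `s & t`: the intersection is non-empty iff some element is shared
theorem ldoh_inter_nonempty {α : Type} [BEq α] [LawfulBEq α] (s t : PySem.Set α) :
    (!(PySem.Set.inter s t).isEmpty) = true ↔ ∃ x ∈ s, x ∈ t := by
  simp [PySem.Set.inter, List.isEmpty_eq_false_iff, List.eq_nil_iff_forall_not_mem,
    List.mem_filter]

-- A's set-query shape equals the three per-key `any`s combined, for any key list
theorem ldoh_A_side (ks : List String) :
    (let keys : PySem.Set String := PySem.Set.ofList (ks.map (fun k => PySem.Str.lower k))
     if !(PySem.Set.inter keys ldohStrongKeys).isEmpty then true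
     else
       let has_name := PySem.Set.contains keys "name" || PySem.Set.contains keys "title"
       let has_urlish :=
         (keys.any (fun k => PySem.Str.isIn "api" k && PySem.Str.isIn "url" k)) ||
           PySem.Set.contains keys "domain"
       has_name && has_urlish) =
    ((ks.any (fun k => ldohG1 (PySem.Str.lower k))) ||
      ((ks.any (fun k => ldohG2 (PySem.Str.lower k))) && (ks.any (fun k => ldohG3 (PySem.Str.lower k))))) := by
  dsimp only
  rw [Bool.eq_iff_iff]
  simp only [Bool.if_true_left, Bool.or_eq_true, Bool.and_eq_true, ldoh_inter_nonempty,
    PySem.Set.mem_ofList, ldoh_mem_strong, List.any_eq_true, PySem.Set.contains_iff,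
    List.mem_map, ldohG1, ldohG2, ldohG3, beq_iff_eq]
  simp only [decide_eq_true_eq, ldoh_inter_nonempty, PySem.Set.mem_ofList, List.mem_map,
    ldoh_mem_strong, exists_exists_and_eq_and, and_or_left, exists_or, or_assoc]

-- the classification table read back, and the classifier versus A's three predicates
theorem ldoh_get (kl : String) : PySem.Dict.get? ldohCats kl =
    if "apibaseurl" = kl then some 0 else if "supportscheckin" = kl then some 0
    else if "checkinurl" = kl then some 0 else if "name" = kl then some 1
    else if "title" = kl then some 1 else if "domain" = kl then some 2 else none := by
  have h : ldohCats = PySem.Dict.mk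
    [("apibaseurl", 0), ("supportscheckin", 0), ("checkinurl", 0),
     ("name", 1), ("title", 1), ("domain", 2)] := by decide
  rw [h]
  simp only [PySem.Dict.get?_mk_cons, beq_iff_eq]
  split_ifs <;> rfl

theorem ldoh_get_none (kl : String) (h1 : ¬"apibaseurl" = kl) (h2 : ¬"supportscheckin" = kl)
    (h3 : ¬"checkinurl" = kl) (h4 : ¬"name" = kl) (h5 : ¬"title" = kl) (h6 : ¬"domain" = kl) :
    PySem.Dict.get? ldohCats kl = none := by
  rw [ldoh_get]
  simp only [if_neg h1, if_neg h2, if_neg h3, if_neg h4, if_neg h5, if_neg h6]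

theorem ldoh_classify0 (kl : String) : (ldohClassify kl == 0) = ldohG1 kl := by
  by_cases h1 : "apibaseurl" = kl; · subst h1; decide
  by_cases h2 : "supportscheckin" = kl; · subst h2; decide
  by_cases h3 : "checkinurl" = kl; · subst h3; decide
  by_cases h4 : "name" = kl; · subst h4; decide
  by_cases h5 : "title" = kl; · subst h5; decide
  by_cases h6 : "domain" = kl; · subst h6; decide
  unfold ldohClassify
  rw [ldoh_get_none kl h1 h2 h3 h4 h5 h6]
  have g1 : ldohG1 kl = false := by
    simp only [ldohG1, Bool.or_eq_false_iff, beq_eq_false_iff_ne]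
    exact ⟨⟨Ne.symm h1, Ne.symm h2⟩, Ne.symm h3⟩
  rw [g1]
  show ((if (PySem.Str.isIn "api" kl && PySem.Str.isIn "url" kl) = true then (2:Int) else 3) == 0) = false
  split <;> decide

theorem ldoh_classify1 (kl : String) : (ldohClassify kl == 1) = ldohG2 kl := by
  by_cases h1 : "apibaseurl" = kl; · subst h1; decide
  by_cases h2 : "supportscheckin" = kl; · subst h2; decide
  by_cases h3 : "checkinurl" = kl; · subst h3; decide
  by_cases h4 : "name" = kl; · subst h4; decide
  by_cases h5 : "title" = kl; · subst h5; decide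
  by_cases h6 : "domain" = kl; · subst h6; decide
  unfold ldohClassify
  rw [ldoh_get_none kl h1 h2 h3 h4 h5 h6]
  have g2 : ldohG2 kl = false := by
    simp only [ldohG2, Bool.or_eq_false_iff, beq_eq_false_iff_ne]
    exact ⟨Ne.symm h4, Ne.symm h5⟩
  rw [g2]
  show ((if (PySem.Str.isIn "api" kl && PySem.Str.isIn "url" kl) = true then (2:Int) else 3) == 1) = false
  split <;> decide

theorem ldoh_classify2 (kl : String) : (ldohClassify kl == 2) = (!ldohG1 kl && ldohG3 kl) := by
  by_cases h1 : "apibaseurl" = kl; · subst h1; decide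
  by_cases h2 : "supportscheckin" = kl; · subst h2; decide
  by_cases h3 : "checkinurl" = kl; · subst h3; decide
  by_cases h4 : "name" = kl; · subst h4; decide
  by_cases h5 : "title" = kl; · subst h5; decide
  by_cases h6 : "domain" = kl; · subst h6; decide
  unfold ldohClassify
  rw [ldoh_get_none kl h1 h2 h3 h4 h5 h6]
  have g1 : ldohG1 kl = false := by
    simp only [ldohG1, Bool.or_eq_false_iff, beq_eq_false_iff_ne]
    exact ⟨⟨Ne.symm h1, Ne.symm h2⟩, Ne.symm h3⟩
  have g3 : ldohG3 kl = (PySem.Str.isIn "api" kl && PySem.Str.isIn "url" kl) := by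
    simp [ldohG3, Ne.symm h6]
  rw [g1, g3]
  show ((if (PySem.Str.isIn "api" kl && PySem.Str.isIn "url" kl) = true then (2:Int) else 3) == 2)
      = (!false && (PySem.Str.isIn "api" kl && PySem.Str.isIn "url" kl))
  split <;> rename_i h <;> simp only [PySem.Str.isIn, Bool.and_eq_true] at h <;> simp_all

-- the scan is the early-exit form of "any strong, else flags": characterised globally
theorem ldoh_scan_eq (ks : List String) (seen : PySem.Set Int) :
    ldohScan ks seen =
      ((ks.any (fun k => ldohClassify (PySem.Str.lower k) == 0)) ||
        ((PySem.Set.contains seen 1 || ks.any (fun k => ldohClassify (PySem.Str.lower k) == 1)) &&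
         (PySem.Set.contains seen 2 || ks.any (fun k => ldohClassify (PySem.Str.lower k) == 2)))) := by
  induction ks generalizing seen with
  | nil => simp [ldohScan]
  | cons k ks ih =>
    simp only [ldohScan, List.any_cons]
    by_cases h0 : (ldohClassify (PySem.Str.lower k) == 0) = true
    · simp [h0]
    · rw [if_neg h0, ih]
      have hc1 : PySem.Set.contains (PySem.Set.add seen (ldohClassify (PySem.Str.lower k))) 1
          = (PySem.Set.contains seen 1 || (ldohClassify (PySem.Str.lower k) == 1)) := by
        rw [Bool.eq_iff_iff]
        simp only [PySem.Set.contains_iff, PySem.Set.mem_add, Bool.or_eq_true, beq_iff_eq]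
        exact or_congr Iff.rfl eq_comm
      have hc2 : PySem.Set.contains (PySem.Set.add seen (ldohClassify (PySem.Str.lower k))) 2
          = (PySem.Set.contains seen 2 || (ldohClassify (PySem.Str.lower k) == 2)) := by
        rw [Bool.eq_iff_iff]
        simp only [PySem.Set.contains_iff, PySem.Set.mem_add, Bool.or_eq_true, beq_iff_eq]
        exact or_congr Iff.rfl eq_comm
      rw [hc1, hc2, Bool.eq_false_iff.mpr h0]
      simp only [Bool.false_or, Bool.or_assoc]

-- ===== VERDICT (by name: the statement is the Claim_ definition above) =====
theorem looks_like_ldoh_site_item_py_spec : Claim_equal_looks_like_ldoh_site_item_py := by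
  intro item _
  unfold Spec_looks_like_ldoh_site_item_py
  unfold looks_like_ldoh_site_item_py looks_like_ldoh_site_item_py_alt
  generalize (PySem.Dict.ofList item).keys = ks
  rw [ldoh_scan_eq, ldoh_A_side]
  have he : ∀ n : Int, PySem.Set.contains (PySem.Set.empty : PySem.Set Int) n = false := fun _ => rfl
  rw [he 1, he 2]
  simp only [Bool.false_or, ldoh_classify0, ldoh_classify1, ldoh_classify2]
  rw [Bool.eq_iff_iff]
  simp only [Bool.or_eq_true, Bool.and_eq_true, List.any_eq_true, Bool.not_eq_true']
  constructor
  · rintro (h | ⟨hn, hu⟩)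
    · exact Or.inl h
    · by_cases hs : ∃ k ∈ ks, ldohG1 (PySem.Str.lower k) = true
      · exact Or.inl hs
      · push Not at hs
        obtain ⟨k, hk, hg3⟩ := hu
        exact Or.inr ⟨hn, k, hk, by simp [hs k hk, hg3]⟩
  · rintro (h | ⟨hn, k, hk, hg⟩)
    · exact Or.inl h
    · exact Or.inr ⟨hn, k, hk, hg.2⟩
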